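-- pv_equiv track=rewrite | github.com/DanilaCrazy0/Yandex_trains | SchoolOfAnalyses/1.py | answer
-- ===== SOURCE A (Python) =====
-- def answer(n, k, lst):
--     if k == 0:
--         return 0
--     max_unique = 0
--     freq = {}
--     unique = 0
--
--     for i in range(n):
--         if i >= k:
--             left_element = lst[i - k]
--             freq[left_element] -= 1
--             if freq[left_element] == 0:
--                 unique -= 1
--         new_element = lst[i]
--         if new_element not in freq or freq[new_element] == 0:
--             unique += 1
--             freq[new_element] = 1
--         else:
--             freq[new_element] += 1
--         if i >= k - 1:
--             max_unique = max(max_unique, unique)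
--     return max_unique
-- ===== SOURCE B (Python) =====
-- def answer(n, k, lst):
--     if k <= 0:
--         return 0
--     best = 0
--     for i in range(n - k + 1):
--         best = max(best, len(set(lst[i:i + k])))
--     return best
-- ===== Notes on version B (the rewrite author's own statement) =====
-- stated objective: simpler
-- what changed: B recomputes each window's distinct count from scratch as len(set(lst[i:i+k])) over the n-k+1 window starts, instead of A's single-pass sliding-window frequency dict with incremental unique counting.
import Mathlib
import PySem

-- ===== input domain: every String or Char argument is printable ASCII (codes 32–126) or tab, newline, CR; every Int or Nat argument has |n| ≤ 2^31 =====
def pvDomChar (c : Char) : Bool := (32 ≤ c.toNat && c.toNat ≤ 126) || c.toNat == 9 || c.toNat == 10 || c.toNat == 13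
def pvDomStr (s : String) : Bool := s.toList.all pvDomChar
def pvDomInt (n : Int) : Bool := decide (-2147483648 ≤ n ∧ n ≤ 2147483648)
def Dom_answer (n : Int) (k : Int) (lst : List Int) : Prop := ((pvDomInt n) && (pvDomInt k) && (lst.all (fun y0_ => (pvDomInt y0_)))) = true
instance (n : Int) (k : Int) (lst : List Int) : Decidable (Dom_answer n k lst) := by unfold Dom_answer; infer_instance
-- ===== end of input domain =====

-- B rescans each length-k window with a slice + set instead of A's incremental sliding frequency dict: simpler, not faster.

-- ===== PORT A =====
-- one iteration of A's loop: state (max_unique, freq, unique), loop variable i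
def answerStep (k : Int) (lst : List Int) (s : Int × PySem.Dict Int Int × Int) (i : Int) :
    Int × PySem.Dict Int Int × Int :=
  let mx := s.1
  let freq := s.2.1
  let unique := s.2.2
  let fu :=
    if k ≤ i then
      let le := PySem.List.pyGetD lst (i - k) 0
      let freq' := freq.insert le (freq.getD le 0 - 1)
      if freq'.getD le 0 == 0 then (freq', unique - 1) else (freq', unique)
    else (freq, unique)
  let freq1 := fu.1
  let u1 := fu.2
  let ne := PySem.List.pyGetD lst i 0
  let fu2 :=
    if !(freq1.contains ne) || freq1.getD ne 0 == 0 then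
      (freq1.insert ne 1, u1 + 1)
    else
      (freq1.insert ne (freq1.getD ne 0 + 1), u1)
  let mx' := if k - 1 ≤ i then max mx fu2.2 else mx
  (mx', fu2.1, fu2.2)

def answer (n : Int) (k : Int) (lst : List Int) : Int :=
  if k = 0 then 0
  else
    ((PySem.List.pyRange 0 n 1).foldl (answerStep k lst) (0, PySem.Dict.empty, 0)).1

-- ===== PORT B =====
def answer_alt (n : Int) (k : Int) (lst : List Int) : Int :=
  if k ≤ 0 then 0
  else
    (PySem.List.pyRange 0 (n - k + 1) 1).foldl
      (fun best i =>
        max best ((PySem.Set.ofList (PySem.List.slice lst (some i) (some (i + k)))).length : Int))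
      0

-- ===== PRECONDITION & SPEC =====
-- Pre_ excludes exactly the inputs where A raises: with n > 0 and k ≠ 0, a negative k (KeyError on
-- the empty freq dict at i = 0) or n > len(lst) (IndexError reading lst[i]); A returns everywhere else.
def Pre_answer (n : Int) (k : Int) (lst : List Int) : Prop :=
  0 < n → k ≠ 0 → (0 < k ∧ n ≤ lst.length)
instance (n : Int) (k : Int) (lst : List Int) : Decidable (Pre_answer n k lst) := by
  unfold Pre_answer; infer_instance

def pvWitness_answer : Int × Int × List Int := (3, 2, [1, 2, 2])

def Spec_answer (n : Int) (k : Int) (lst : List Int) (out : Int) : Prop := out = answer_alt n k lst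
instance (n : Int) (k : Int) (lst : List Int) (out : Int) : Decidable (Spec_answer n k lst out) := by
  unfold Spec_answer; infer_instance

-- ===== CLAIM (what is proved, stated in full; the proofs are below) =====
def Claim_equal_answer : Prop := ∀ (n : Int) (k : Int) (lst : List Int),
  Dom_answer n k lst → Pre_answer n k lst → Spec_answer n k lst (answer n k lst)

-- ===== LEMMAS AND PROOFS =====

-- the sliding window after t iterations: elements lst[t-K .. t-1] (all of lst[:t] while t ≤ K)
def pvWnd (lst : List Int) (K t : Nat) : List Int := (lst.take t).drop (t - K)

-- number of distinct elements of the window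
def pvDcard (lst : List Int) (K t : Nat) : Int := ((pvWnd lst K t).toFinset.card : Int)

-- A's max_unique after t iterations
def pvMx (lst : List Int) (K : Nat) : Nat → Int
  | 0 => 0
  | t + 1 => if K ≤ t + 1 then max (pvMx lst K t) (pvDcard lst K (t + 1)) else pvMx lst K t

-- loop invariant for A's state (max_unique, freq, unique) after t iterations
def pvInv (lst : List Int) (K t : Nat) (s : Int × PySem.Dict Int Int × Int) : Prop :=
  s.1 = pvMx lst K t ∧
  (∀ x, s.2.1.getD x 0 = ((pvWnd lst K t).count x : Int)) ∧
  s.2.2 = pvDcard lst K t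

-- A's membership-or-zero test is just a zero test of the default lookup
theorem pv_cond_eq (d : PySem.Dict Int Int) (x : Int) :
    (!(d.contains x) || (d.getD x 0 == 0)) = (d.getD x 0 == 0) := by
  cases h : d.contains x with
  | false =>
      have := PySem.Dict.getD_of_not_contains d (0:Int) h
      simp [this]
  | true => simp

-- effect of A's left-element removal on the tracked counts and distinct-size
theorem pvRemove (W : List Int) (d : PySem.Dict Int Int) (u x : Int)
    (hd : ∀ z, d.getD z 0 = (((x :: W).count z : Nat) : Int))
    (hu : u = (((x :: W).toFinset.card : Nat) : Int)) :
    (∀ z, (d.insert x (d.getD x 0 - 1)).getD z 0 = ((W.count z : Nat) : Int)) ∧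
    (if (d.insert x (d.getD x 0 - 1)).getD x 0 == 0 then u - 1 else u)
      = ((W.toFinset.card : Nat) : Int) := by
  have hgz : ∀ z, (d.insert x (d.getD x 0 - 1)).getD z 0 = ((W.count z : Nat) : Int) := by
    intro z
    rw [PySem.Dict.getD_insert]
    by_cases hz : z = x
    · rw [if_pos hz, hz, hd x]; simp [List.count_cons_self]
    · rw [if_neg hz, hd z]
      have hz' : ¬ x = z := fun h => hz h.symm
      simp [hz']
  refine ⟨hgz, ?_⟩
  rw [hgz x]
  by_cases hx : x ∈ W
  · have hc : W.count x ≠ 0 := by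
      intro h0; exact (List.count_eq_zero.mp h0) hx
    rw [if_neg (by simpa using (by exact_mod_cast hc : ((W.count x : Nat) : Int) ≠ 0))]
    rw [hu]
    congr 1
    rw [List.toFinset_cons, Finset.insert_eq_self.mpr (List.mem_toFinset.mpr hx)]
  · have hc : W.count x = 0 := List.count_eq_zero.mpr hx
    rw [if_pos (by simp [hc])]
    rw [hu, List.toFinset_cons, Finset.card_insert_of_notMem (by simpa using hx)]
    push_cast; omega

-- effect of A's new-element insertion on the tracked counts and distinct-size
theorem pvAdd (W : List Int) (d : PySem.Dict Int Int) (u y : Int)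
    (hd : ∀ z, d.getD z 0 = ((W.count z : Nat) : Int))
    (hu : u = ((W.toFinset.card : Nat) : Int)) :
    (∀ z, (if !(d.contains y) || d.getD y 0 == 0 then (d.insert y 1, u + 1)
           else (d.insert y (d.getD y 0 + 1), u)).1.getD z 0 = (((W ++ [y]).count z : Nat) : Int)) ∧
    (if !(d.contains y) || d.getD y 0 == 0 then (d.insert y 1, u + 1)
     else (d.insert y (d.getD y 0 + 1), u)).2 = (((W ++ [y]).toFinset.card : Nat) : Int) := by
  rw [pv_cond_eq, hd y]
  by_cases hy : y ∈ W
  · have hc : W.count y ≠ 0 := by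
      intro h0; exact (List.count_eq_zero.mp h0) hy
    rw [if_neg (by simpa using (by exact_mod_cast hc : ((W.count y : Nat) : Int) ≠ 0))]
    constructor
    · intro z
      rw [PySem.Dict.getD_insert]
      by_cases hz : z = y
      · rw [if_pos hz, hz]; simp [List.count_append]
      · rw [if_neg hz, hd z]
        have hz' : ¬ y = z := fun h => hz h.symm
        simp [List.count_append, hz']
    · rw [hu]
      rw [List.toFinset_append]
      simp [Finset.insert_eq_self.mpr (List.mem_toFinset.mpr hy)]
  · have hc : W.count y = 0 := List.count_eq_zero.mpr hy
    rw [if_pos (by simp [hc])]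
    constructor
    · intro z
      rw [PySem.Dict.getD_insert]
      by_cases hz : z = y
      · rw [if_pos hz, hz]; simp [List.count_append, hc]
      · rw [if_neg hz, hd z]
        have hz' : ¬ y = z := fun h => hz h.symm
        simp [List.count_append, hz']
    · rw [hu]
      have hun : (W ++ [y]).toFinset = insert y W.toFinset := by
        ext a; simp
      rw [hun, Finset.card_insert_of_notMem (by simpa using hy)]
      push_cast; omega

-- one loop iteration of A preserves the invariant
theorem pvStep (lst : List Int) (K t : Nat) (k : Int) (hk : k = (K : Int)) (hK : 1 ≤ K)
    (ht : t < lst.length) (s : Int × PySem.Dict Int Int × Int) (hs : pvInv lst K t s) :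
    pvInv lst K (t + 1) (answerStep k lst s ((t : Nat) : Int)) := by
  obtain ⟨mx, d, u⟩ := s
  obtain ⟨hmx, hd, hu⟩ := hs
  subst hk
  simp only at hmx hd hu
  have hlen_take : (lst.take t).length = t := by simp; omega
  have hWnext : pvWnd lst K (t + 1) = (lst.take t).drop (t + 1 - K) ++ [lst[t]] := by
    unfold pvWnd
    rw [List.take_add_one, List.getElem?_eq_getElem ht]
    simp only [Option.toList_some]
    rw [List.drop_append_of_le_length (by omega)]
  simp only [answerStep]
  by_cases hKt : K ≤ t
  · -- removal happens
    rw [if_pos (by exact_mod_cast hKt : (K : Int) ≤ (t : Int))]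
    have hWcons : pvWnd lst K t = lst[t - K]'(by omega) :: (lst.take t).drop (t + 1 - K) := by
      unfold pvWnd
      rw [List.drop_eq_getElem_cons (by omega : t - K < (lst.take t).length)]
      congr 1
      · exact List.getElem_take
      · congr 1; omega
    rw [show ((t : Int) - (K : Int)) = ((t - K : Nat) : Int) by omega,
        PySem.List.pyGetD_natCast, List.getD_eq_getElem lst 0 (by omega : t - K < lst.length)]
    have hd' : ∀ z, d.getD z 0
        = (((lst[t - K]'(by omega) :: (lst.take t).drop (t + 1 - K)).count z : Nat) : Int) := by
      intro z; rw [hd z, hWcons]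
    obtain ⟨hd1, hu1⟩ := pvRemove ((lst.take t).drop (t + 1 - K)) d u (lst[t - K]'(by omega)) hd'
      (by rw [hu]; unfold pvDcard; rw [hWcons])
    -- collapse the pair-valued if of the removal phase
    rw [show (if (d.insert (lst[t-K]'(by omega)) (d.getD (lst[t-K]'(by omega)) 0 - 1)).getD (lst[t-K]'(by omega)) 0 == 0
              then (d.insert (lst[t-K]'(by omega)) (d.getD (lst[t-K]'(by omega)) 0 - 1), u - 1)
              else (d.insert (lst[t-K]'(by omega)) (d.getD (lst[t-K]'(by omega)) 0 - 1), u))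
        = (d.insert (lst[t-K]'(by omega)) (d.getD (lst[t-K]'(by omega)) 0 - 1),
           if (d.insert (lst[t-K]'(by omega)) (d.getD (lst[t-K]'(by omega)) 0 - 1)).getD (lst[t-K]'(by omega)) 0 == 0
           then u - 1 else u) from by split <;> rfl]
    rw [PySem.List.pyGetD_natCast, List.getD_eq_getElem lst 0 ht]
    obtain ⟨hd2, hu2⟩ := pvAdd ((lst.take t).drop (t + 1 - K)) _ _ (lst[t]) hd1 hu1
    refine ⟨?_, fun z => by rw [hWnext]; exact hd2 z, by unfold pvDcard; rw [hWnext]; exact hu2⟩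
    rw [if_pos (by omega : (K : Int) - 1 ≤ (t : Int))]
    simp only [pvMx]
    rw [if_pos (by omega : K ≤ t + 1), hmx, hu2]
    unfold pvDcard
    rw [hWnext]
  · -- no removal: t < K
    rw [if_neg (by omega : ¬ (K : Int) ≤ (t : Int))]
    have hW0 : (lst.take t).drop (t + 1 - K) = pvWnd lst K t := by
      unfold pvWnd; congr 1; omega
    rw [PySem.List.pyGetD_natCast, List.getD_eq_getElem lst 0 ht]
    obtain ⟨hd2, hu2⟩ := pvAdd (pvWnd lst K t) d u (lst[t]) hd (by rw [hu]; unfold pvDcard; rfl)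
    rw [hW0] at hWnext
    refine ⟨?_, fun z => by rw [hWnext]; exact hd2 z, by unfold pvDcard; rw [hWnext]; exact hu2⟩
    by_cases h2 : K ≤ t + 1
    · rw [if_pos (by omega : (K : Int) - 1 ≤ (t : Int))]
      simp only [pvMx]
      rw [if_pos h2, hmx, hu2]
      unfold pvDcard
      rw [hWnext]
    · rw [if_neg (by omega : ¬ ((K : Int) - 1 ≤ (t : Int)))]
      simp only [pvMx]
      rw [if_neg h2, hmx]

-- A's whole loop satisfies the invariant
theorem pvFoldA (lst : List Int) (K : Nat) (k : Int) (hk : k = (K : Int)) (hK : 1 ≤ K)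
    (N : Nat) (hN : N ≤ lst.length) :
    pvInv lst K N ((List.range N).foldl (fun s (j : Nat) => answerStep k lst s ((j : Nat) : Int))
      (0, PySem.Dict.empty, 0)) := by
  induction N with
  | zero =>
      refine ⟨rfl, fun x => ?_, ?_⟩ <;> simp [pvWnd, pvDcard, PySem.Dict.getD_empty]
  | succ N ih =>
      rw [List.range_succ, List.foldl_append]
      exact pvStep lst K N k hk hK (by omega) _ (ih (by omega))

-- len(set(w)) is the Finset cardinality of w
theorem pvSetLen (w : List Int) :
    ((PySem.Set.ofList w).length : Int) = ((w.toFinset.card : Nat) : Int) := by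
  have h1 : (PySem.Set.ofList w).toFinset = w.toFinset := by
    ext y; simp [PySem.Set.mem_ofList]
  have h2 := List.toFinset_card_of_nodup (PySem.Set.nodup_ofList (xs := w))
  rw [h1] at h2
  exact_mod_cast h2.symm

-- A's running max equals B's running max over the window starts
theorem pvMx_eq_fold (lst : List Int) (K : Nat) (hK : 1 ≤ K) (N : Nat) :
    pvMx lst K N
      = (List.range (N + 1 - K)).foldl (fun b j => max b (pvDcard lst K (j + K))) 0 := by
  induction N with
  | zero =>
      rw [show 0 + 1 - K = 0 from by omega]
      rfl
  | succ N ih =>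
      by_cases h2 : K ≤ N + 1
      · simp only [pvMx]
        rw [if_pos h2, ih,
            show N + 1 + 1 - K = (N + 1 - K) + 1 from by omega,
            List.range_succ, List.foldl_append]
        simp only [List.foldl_cons, List.foldl_nil]
        rw [show N + 1 - K + K = N + 1 from by omega]
      · simp only [pvMx]
        rw [if_neg h2, ih, show N + 1 + 1 - K = N + 1 - K from by omega]

-- ===== VERDICT (by name: the statement is the Claim_ definition above) =====
theorem answer_spec : Claim_equal_answer := by
  intro n k lst _ hpre
  unfold Spec_answer answer answer_alt
  by_cases hkpos : 0 < k
  · rw [if_neg (by omega : ¬ k = 0), if_neg (by omega : ¬ k ≤ 0)]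
    by_cases hn : 0 < n
    · obtain ⟨hk0, hlen⟩ := hpre hn (by omega : k ≠ 0)
      have hk : k = (k.toNat : Int) := by omega
      have hK1 : 1 ≤ k.toNat := by omega
      have hNlen : n.toNat ≤ lst.length := by omega
      -- A side: the loop over range(n) as a fold over List.range n.toNat
      rw [PySem.List.pyRange_one 0 n, show ((n - 0).toNat) = n.toNat from by omega,
          List.foldl_map]
      have hA : (List.range n.toNat).foldl
            (fun s (j : Nat) => answerStep k lst s (0 + (j : Int))) (0, PySem.Dict.empty, 0)
          = (List.range n.toNat).foldl
            (fun s (j : Nat) => answerStep k lst s ((j : Nat) : Int)) (0, PySem.Dict.empty, 0) :=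
        PySem.List.foldl_congr_mem _ _ _ _ (fun acc x _ => by rw [zero_add])
      rw [hA, (pvFoldA lst k.toNat k hk hK1 n.toNat hNlen).1]
      -- B side: the loop over range(n-k+1) as a fold of window distinct-counts
      rw [PySem.List.pyRange_one 0 (n - k + 1), List.foldl_map]
      have hB : (List.range (n - k + 1 - 0).toNat).foldl
            (fun b (j : Nat) => max b
              ((PySem.Set.ofList (PySem.List.slice lst (some (0 + (j : Int)))
                 (some ((0 + (j : Int)) + k)))).length : Int)) 0
          = (List.range (n - k + 1 - 0).toNat).foldl
            (fun b (j : Nat) => max b (pvDcard lst k.toNat (j + k.toNat))) 0 := by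
        apply PySem.List.foldl_congr_mem
        intro acc j hj
        have hjM : j < (n - k + 1 - 0).toNat := List.mem_range.mp hj
        rw [show (0 + (j : Int)) = ((j : Nat) : Int) from by omega,
            show ((j : Int) + k) = (((j + k.toNat : Nat)) : Int) from by omega,
            PySem.List.slice_natCast, show (j + k.toNat - j) = k.toNat from by omega,
            pvSetLen]
        congr 2
        unfold pvWnd
        rw [show (j + k.toNat - k.toNat) = j from by omega, List.drop_take,
            show (j + k.toNat - j) = k.toNat from by omega]
      rw [hB, show (n - k + 1 - 0).toNat = n.toNat + 1 - k.toNat from by omega]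
      exact pvMx_eq_fold lst k.toNat hK1 n.toNat
    · rw [PySem.List.pyRange_one_eq_nil (by omega : n ≤ 0),
          PySem.List.pyRange_one_eq_nil (by omega : n - k + 1 ≤ 0)]
      rfl
  · by_cases hk0 : k = 0
    · rw [if_pos hk0, if_pos (by omega)]
    · have hn : ¬ 0 < n := fun h => by have := hpre h hk0; omega
      rw [if_neg hk0, if_pos (by omega : k ≤ 0),
          PySem.List.pyRange_one_eq_nil (by omega : n ≤ 0)]
      rfl
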